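-- pv_equiv track=rewrite | github.com/oferwess/Build_AWS_Deploy | task3-Python/snapshot_shorter.py | find_minimum_maximum
-- ===== SOURCE A (Python) =====
-- def find_minimum_maximum (snapshots_array):
--     index=0
--     minimum = 0
--     maximum = 0
--     for each_snapshot in snapshots_array:
--         if each_snapshot["date"] < snapshots_array[minimum]["date"]:
--             minimum=index
--         elif each_snapshot["date"] > snapshots_array[maximum]["date"]:
--             maximum=index
--         index=index+1
--     min_max_dict = {"minimum":snapshots_array[minimum],"maximum":snapshots_array[maximum]}
--     return (min_max_dict)
-- ===== SOURCE B (Python) =====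
-- def find_minimum_maximum(snapshots_array):
--     date = lambda s: s["date"]
--     return {"minimum": min(snapshots_array, key=date),
--             "maximum": max(snapshots_array, key=date)}
-- ===== Notes on version B (the rewrite author's own statement) =====
-- stated objective: simpler
-- what changed: A's single fused loop tracking two integer indices with an if/elif is replaced by two independent key-based reductions (builtin min and max over the elements), with no index bookkeeping; both pick the first extremal element, matching A's strict-comparison first-wins updates.
import Mathlib
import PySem

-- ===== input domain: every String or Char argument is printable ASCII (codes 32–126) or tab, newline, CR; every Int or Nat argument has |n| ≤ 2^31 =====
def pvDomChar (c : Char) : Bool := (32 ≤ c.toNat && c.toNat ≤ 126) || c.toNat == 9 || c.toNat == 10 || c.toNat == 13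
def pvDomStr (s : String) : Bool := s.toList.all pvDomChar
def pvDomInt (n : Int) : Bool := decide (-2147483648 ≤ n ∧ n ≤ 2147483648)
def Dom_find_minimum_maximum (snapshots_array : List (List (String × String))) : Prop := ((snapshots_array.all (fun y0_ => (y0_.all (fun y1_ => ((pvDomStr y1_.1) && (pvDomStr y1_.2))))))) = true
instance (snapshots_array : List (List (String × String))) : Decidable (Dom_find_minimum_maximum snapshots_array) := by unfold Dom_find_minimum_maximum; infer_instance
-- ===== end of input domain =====

-- B replaces A's fused index-tracking if/elif loop with two independent key-based
-- reductions (builtin min and max with key = the "date" entry); objective: simpler.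

-- ===== PORT A =====
-- s["date"] ported as a first-match dict lookup with a default; Pre_ requires the
-- "date" key to be present (Python raises KeyError otherwise), so the default is
-- never reached on admitted inputs.
def dateOf (s : List (String × String)) : String :=
  (PySem.Dict.mk s).getD "date" ""

-- the body of A's for-loop, state (index, minimum, maximum); the elif keeps branch order
def stepA (snapshots_array : List (List (String × String)))
    (st : Int × Int × Int) (each_snapshot : List (String × String)) : Int × Int × Int :=
  if dateOf each_snapshot < dateOf (PySem.List.pyGetD snapshots_array st.2.1 []) then
    (st.1 + 1, st.1, st.2.2)
  else if dateOf each_snapshot > dateOf (PySem.List.pyGetD snapshots_array st.2.2 []) then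
    (st.1 + 1, st.2.1, st.1)
  else
    (st.1 + 1, st.2.1, st.2.2)

def find_minimum_maximum (snapshots_array : List (List (String × String))) : List (String × List (String × String)) :=
  let st := snapshots_array.foldl (stepA snapshots_array) (0, 0, 0)
  [("minimum", PySem.List.pyGetD snapshots_array st.2.1 []),
   ("maximum", PySem.List.pyGetD snapshots_array st.2.2 [])]

-- ===== PORT B =====
-- two independent reductions; .getD [] is unreachable under Pre_ (nonempty input,
-- where Python's min/max raise ValueError on []).
def find_minimum_maximum_alt (snapshots_array : List (List (String × String))) : List (String × List (String × String)) :=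
  [("minimum", (PySem.List.min? snapshots_array dateOf).getD []),
   ("maximum", (PySem.List.max? snapshots_array dateOf).getD [])]

-- ===== PRECONDITION & SPEC =====
-- Pre_ excludes the empty array (A raises IndexError, B ValueError) and snapshots
-- without a "date" key (both raise KeyError).
def Pre_find_minimum_maximum (snapshots_array : List (List (String × String))) : Prop :=
  snapshots_array ≠ [] ∧ ∀ s ∈ snapshots_array, "date" ∈ s.map Prod.fst
instance (snapshots_array : List (List (String × String))) : Decidable (Pre_find_minimum_maximum snapshots_array) := by unfold Pre_find_minimum_maximum; infer_instance

def pvWitness_find_minimum_maximum : (List (List (String × String))) :=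
  ([[("date", "2020-01-02"), ("id", "a")], [("date", "2019-12-31"), ("id", "b")]])

def Spec_find_minimum_maximum (snapshots_array : List (List (String × String))) (out : List (String × List (String × String))) : Prop := out = find_minimum_maximum_alt snapshots_array
instance (snapshots_array : List (List (String × String))) (out : List (String × List (String × String))) : Decidable (Spec_find_minimum_maximum snapshots_array out) := by unfold Spec_find_minimum_maximum; infer_instance

-- ===== CLAIM (what is proved, stated in full; the proofs are below) =====
def Claim_equal_find_minimum_maximum : Prop := ∀ (snapshots_array : List (List (String × String))), Dom_find_minimum_maximum snapshots_array → Pre_find_minimum_maximum snapshots_array → Spec_find_minimum_maximum snapshots_array (find_minimum_maximum snapshots_array)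

-- ===== LEMMAS AND PROOFS =====

theorem min?_snoc {a : Type} (l : List a) (x : a) (k : a → String) :
    PySem.List.min? (l ++ [x]) k =
      (match PySem.List.min? l k with
       | none => some x
       | some m => if k x < k m then some x else some m) := by
  simp only [PySem.List.min?, List.foldl_append, List.foldl_cons, List.foldl_nil]
  rfl

theorem max?_snoc {a : Type} (l : List a) (x : a) (k : a → String) :
    PySem.List.max? (l ++ [x]) k =
      (match PySem.List.max? l k with
       | none => some x
       | some m => if k m < k x then some x else some m) := by
  simp only [PySem.List.max?, List.foldl_append, List.foldl_cons, List.foldl_nil]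
  rfl

-- loop invariant for A's fold over the first n elements:
-- the state is (n, m, M) with m, M in range, the elements at m and M are exactly
-- the first-min and first-max of the prefix, and min-date ≤ max-date (which is why
-- A's elif never suppresses a needed max update).
theorem loopA_inv (xs : List (List (String × String))) (n : Nat)
    (h1 : 1 ≤ n) (h2 : n ≤ xs.length) :
    ∃ m M : Nat,
      (xs.take n).foldl (stepA xs) (0, 0, 0) = ((n : Int), (m : Int), (M : Int)) ∧
      m < n ∧ M < n ∧
      PySem.List.min? (xs.take n) dateOf = some (PySem.List.pyGetD xs (m : Int) []) ∧
      PySem.List.max? (xs.take n) dateOf = some (PySem.List.pyGetD xs (M : Int) []) ∧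
      dateOf (PySem.List.pyGetD xs (m : Int) []) ≤ dateOf (PySem.List.pyGetD xs (M : Int) []) := by
  induction n with
  | zero => omega
  | succ n ih =>
    rcases Nat.eq_or_lt_of_le h1 with hbase | hstep
    · -- n + 1 = 1 : the first iteration compares xs[0] with itself and keeps (1,0,0)
      obtain ⟨x0, rest, rfl⟩ : ∃ x0 rest, xs = x0 :: rest := by
        cases xs with
        | nil => simp at h2
        | cons a t => exact ⟨a, t, rfl⟩
      have hn : n = 0 := by omega
      subst hn
      refine ⟨0, 0, ?_, by omega, by omega, ?_, ?_, le_refl _⟩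
      · simp [stepA, PySem.List.pyGetD]
      · simp [PySem.List.min?, PySem.List.pyGetD]
      · simp [PySem.List.max?, PySem.List.pyGetD]
    · -- step: prefix of length n, then element xs[n]
      have hn1 : 1 ≤ n := by omega
      have hnlen : n < xs.length := by omega
      obtain ⟨m, M, hfold, hm, hM, hmin, hmax, hle⟩ := ih hn1 (by omega)
      have htake : xs.take (n + 1) = xs.take n ++ [xs[n]] := by
        rw [List.take_add_one, List.getElem?_eq_getElem hnlen]
        rfl
      have hgm : PySem.List.pyGetD xs (m : Int) [] = xs[m]'(by omega) := by
        rw [PySem.List.pyGetD_natCast]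
        simp [List.getD, List.getElem?_eq_getElem (show m < xs.length by omega)]
      have hgM : PySem.List.pyGetD xs (M : Int) [] = xs[M]'(by omega) := by
        rw [PySem.List.pyGetD_natCast]
        simp [List.getD, List.getElem?_eq_getElem (show M < xs.length by omega)]
      have hgn : PySem.List.pyGetD xs (n : Int) [] = xs[n] := by
        rw [PySem.List.pyGetD_natCast]
        simp [List.getD, List.getElem?_eq_getElem hnlen]
      rw [htake, List.foldl_append, hfold]
      by_cases hlt : dateOf xs[n] < dateOf (PySem.List.pyGetD xs (m : Int) [])
      · -- new minimum at index n; maximum unchanged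
        refine ⟨n, M, ?_, by omega, by omega, ?_, ?_, ?_⟩
        · show stepA xs (_, _, _) _ = _
          simp only [stepA]
          rw [if_pos hlt]
          norm_cast
        · rw [min?_snoc, hmin]
          simp only []
          rw [if_pos hlt, hgn]
        · rw [max?_snoc, hmax]
          have hngt : ¬ dateOf (PySem.List.pyGetD xs (M : Int) []) < dateOf xs[n] :=
            not_lt_of_gt (lt_of_lt_of_le hlt hle)
          simp only []
          rw [if_neg hngt]
        · rw [hgn]
          exact le_of_lt (lt_of_lt_of_le hlt hle)
      · by_cases hgt : dateOf (PySem.List.pyGetD xs (M : Int) []) < dateOf xs[n]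
        · -- new maximum at index n; minimum unchanged
          refine ⟨m, n, ?_, by omega, by omega, ?_, ?_, ?_⟩
          · show stepA xs (_, _, _) _ = _
            simp only [stepA, GT.gt]
            rw [if_neg hlt, if_pos hgt]
            norm_cast
          · rw [min?_snoc, hmin]
            simp only []
            rw [if_neg hlt]
          · rw [max?_snoc, hmax]
            simp only []
            rw [if_pos hgt, hgn]
          · rw [hgn]
            exact le_of_not_gt hlt
        · -- neither: state unchanged
          refine ⟨m, M, ?_, by omega, by omega, ?_, ?_, hle⟩
          · show stepA xs (_, _, _) _ = _
            simp only [stepA, GT.gt]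
            rw [if_neg hlt, if_neg hgt]
            norm_cast
          · rw [min?_snoc, hmin]
            simp only []
            rw [if_neg hlt]
          · rw [max?_snoc, hmax]
            simp only []
            rw [if_neg hgt]

-- ===== VERDICT (by name: the statement is the Claim_ definition above) =====
theorem find_minimum_maximum_spec : Claim_equal_find_minimum_maximum := by
  intro xs _hdom hpre
  obtain ⟨hne, _hdate⟩ := hpre
  have hlen : 1 ≤ xs.length := by
    cases xs with
    | nil => exact absurd rfl hne
    | cons a t => simp
  obtain ⟨m, M, hfold, _, _, hmin, hmax, _⟩ := loopA_inv xs xs.length hlen le_rfl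
  rw [List.take_length] at hfold hmin hmax
  show find_minimum_maximum xs = find_minimum_maximum_alt xs
  unfold find_minimum_maximum find_minimum_maximum_alt
  rw [hfold, hmin, hmax]
  simp
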